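-- pv_equiv track=rewrite | github.com/tkfka1/CodingTest | 프로그래머스/lv2/131127. 할인 행사/할인 행사.py | solution
-- ===== SOURCE A (Python) =====
-- def solution(want, number, discount):
--     answer = 0
--     from collections import deque
--
--     dic = {}
--     for w,n in zip(want,number):
--         dic[w] = n
--
--     dqin = deque(discount[:10])
--     dqout = deque(discount[10:])
--
--     for i in dqin:
--         if dic.get(i):
--             dic[i] -= 1
--         elif dic.get(i) == 0:
--             dic[i] = -1
--
--     while True:
--         for i in dic:
--             if dic[i]:
--                 break
--         else:
--             answer += 1
--
--         if len(dqout):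
--             temp = dqin.popleft()
--             if dic.get(temp):
--                 dic[temp] += 1
--             elif dic.get(temp) == 0:
--                 dic[temp] = 1
--
--             temp = dqout.popleft()
--             dqin.append(temp)
--             if dic.get(temp):
--                 dic[temp] -= 1
--             elif dic.get(temp) == 0:
--                 dic[temp] = -1
--
--         else:
--             break
--
--
--
--     return answer
-- ===== SOURCE B (Python) =====
-- def _bump(cnt, target, bad, x, delta):
--     # slide one element in (+1) or out (-1); keep bad = #keys whose window count mismatches target
--     if x in cnt:
--         if cnt[x] == target[x]:
--             bad += 1
--         cnt[x] += delta
--         if cnt[x] == target[x]: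
--             bad -= 1
--     return bad
--
--
-- def solution(want, number, discount):
--     target = dict(zip(want, number))
--     cnt = {w: 0 for w in target}
--     bad = sum(1 for w in target if target[w] != 0)
--     for d in discount[:10]:
--         bad = _bump(cnt, target, bad, d, 1)
--     answer = 1 if bad == 0 else 0
--     for out, inc in zip(discount, discount[10:]):
--         bad = _bump(cnt, target, bad, out, -1)
--         bad = _bump(cnt, target, bad, inc, 1)
--         if bad == 0:
--             answer += 1
--     return answer
-- ===== Notes on version B (the rewrite author's own statement) =====
-- stated objective: alternative
-- what changed: Replaces A's per-window rescan of the whole wishlist dict with a sliding window that maintains per-item window counts and a single mismatch counter, so each slide does O(1) dict updates instead of iterating the dict; on the generated inputs (small wishlists) this is not measurably faster.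
import Mathlib
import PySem

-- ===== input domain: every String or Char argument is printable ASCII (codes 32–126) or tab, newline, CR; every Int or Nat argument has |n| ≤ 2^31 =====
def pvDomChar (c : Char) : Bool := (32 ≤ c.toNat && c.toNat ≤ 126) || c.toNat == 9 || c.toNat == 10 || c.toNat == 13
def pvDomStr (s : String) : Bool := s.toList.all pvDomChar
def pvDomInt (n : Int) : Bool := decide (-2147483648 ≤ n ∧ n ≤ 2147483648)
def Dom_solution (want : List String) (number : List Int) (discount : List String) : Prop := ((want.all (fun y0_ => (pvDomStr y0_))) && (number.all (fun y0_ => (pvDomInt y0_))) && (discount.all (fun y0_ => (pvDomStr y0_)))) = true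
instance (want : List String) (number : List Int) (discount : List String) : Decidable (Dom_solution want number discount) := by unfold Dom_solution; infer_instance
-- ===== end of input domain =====

-- B replaces A's per-window rescan of the wishlist dict by a sliding window with an
-- incremental mismatch counter (objective: alternative; equivalence of return values proved below).

-- ===== PORT A =====
-- an element i enters the window: if dic.get(i): dic[i] -= 1 elif dic.get(i) == 0: dic[i] = -1
def stepInA (dic : PySem.Dict String Int) (i : String) : PySem.Dict String Int :=
  match dic.get? i with
  | some v => if v ≠ 0 then dic.insert i (v - 1) else dic.insert i (-1)
  | none => dic

-- an element temp leaves the window: if dic.get(temp): dic[temp] += 1 elif dic.get(temp) == 0: dic[temp] = 1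
def stepOutA (dic : PySem.Dict String Int) (t : String) : PySem.Dict String Int :=
  match dic.get? t with
  | some v => if v ≠ 0 then dic.insert t (v + 1) else dic.insert t 1
  | none => dic

-- the 'while True' loop; the for/else over dic counts a day iff every stored value is 0
def loopA (dic : PySem.Dict String Int) (dqin : List String) (dqout : List String) (answer : Int) : Int :=
  let answer := if dic.values.all (fun v => v == 0) then answer + 1 else answer
  match dqout, dqin with
  | [], _ => answer
  | _ :: _, [] => answer    -- dead branch: Python's dqin.popleft() on the 10-element deque never sees it
  | t :: rest, h :: tl =>
      loopA (stepInA (stepOutA dic h) t) (tl ++ [t]) rest answer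

def solution (want : List String) (number : List Int) (discount : List String) : Int :=
  let dic := PySem.Dict.ofList (want.zip number)
  let dqin := PySem.List.slice discount none (some 10)
  let dqout := PySem.List.slice discount (some 10) none
  let dic := dqin.foldl stepInA dic
  loopA dic dqin dqout 0

-- ===== PORT B =====
-- _bump: slide x in (δ=1) or out (δ=-1), keeping bad = #keys whose window count mismatches target
-- (cnt and target always have the same keys, so cnt[x]/target[x] never raise; getD is exact here)
def bumpB (target : PySem.Dict String Int) (st : PySem.Dict String Int × Int) (x : String) (δ : Int) : PySem.Dict String Int × Int :=
  if st.1.contains x then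
    let bad := if st.1.getD x 0 == target.getD x 0 then st.2 + 1 else st.2
    let cnt := st.1.insert x (st.1.getD x 0 + δ)
    let bad := if cnt.getD x 0 == target.getD x 0 then bad - 1 else bad
    (cnt, bad)
  else st

-- one iteration of 'for out, inc in zip(discount, discount[10:])'
def stepSlideB (target : PySem.Dict String Int) (s : (PySem.Dict String Int × Int) × Int) (p : String × String) : (PySem.Dict String Int × Int) × Int :=
  let st := bumpB target s.1 p.1 (-1)
  let st := bumpB target st p.2 1
  (st, if st.2 == 0 then s.2 + 1 else s.2)

def solution_alt (want : List String) (number : List Int) (discount : List String) : Int :=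
  let target := PySem.Dict.ofList (want.zip number)
  let cnt := target.keys.foldl (fun d w => d.insert w 0) PySem.Dict.empty
  let bad : Int := target.keys.foldl (fun acc w => if target.getD w 0 != 0 then acc + 1 else acc) 0
  let st := (PySem.List.slice discount none (some 10)).foldl (fun st d => bumpB target st d 1) (cnt, bad)
  let answer : Int := if st.2 == 0 then 1 else 0
  (((discount.zip (PySem.List.slice discount (some 10) none)).foldl (stepSlideB target) (st, answer))).2

-- ===== PRECONDITION & SPEC =====
def Spec_solution (want : List String) (number : List Int) (discount : List String) (out : Int) : Prop := out = solution_alt want number discount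
instance (want : List String) (number : List Int) (discount : List String) (out : Int) : Decidable (Spec_solution want number discount out) := by unfold Spec_solution; infer_instance

-- ===== CLAIM (what is proved, stated in full; the proofs are below) =====
def Claim_equal_solution : Prop := ∀ (want : List String) (number : List Int) (discount : List String), Dom_solution want number discount → Spec_solution want number discount (solution want number discount)

-- ===== LEMMAS AND PROOFS =====

-- the day's window matches the wishlist: every wanted item appears in the window exactly its wanted number of times
def matchesW (T : PySem.Dict String Int) (win : List String) : Bool :=
  T.keys.all (fun k => T.getD k 0 == (win.count k : Int))

-- reference count of matching windows: current window win, then slide once per element of rest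
def wins (T : PySem.Dict String Int) (win : List String) : List String → Int
  | [] => if matchesW T win then 1 else 0
  | t :: rest => (if matchesW T win then 1 else 0) + wins T (win.tail ++ [t]) rest

-- same, but not counting the initial window (what B's second loop adds)
def tailWins (T : PySem.Dict String Int) (win : List String) : List String → Int
  | [] => 0
  | t :: rest => (if matchesW T (win.tail ++ [t]) then 1 else 0) + tailWins T (win.tail ++ [t]) rest

-- invariant of A's dict: same keys as T, each value = target minus current window count
def InvA (T dic : PySem.Dict String Int) (win : List String) : Prop :=
  dic.keys = T.keys ∧ ∀ k ∈ T.keys, dic.getD k 0 = T.getD k 0 - (win.count k : Int)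

-- invariant of B's state: cnt holds window counts, bad counts mismatching keys
def InvB (T cnt : PySem.Dict String Int) (bad : Int) (win : List String) : Prop :=
  cnt.keys = T.keys ∧ (∀ k ∈ T.keys, cnt.getD k 0 = (win.count k : Int)) ∧
    bad = (T.keys.countP (fun k => !(T.getD k 0 == (win.count k : Int))) : Int)

theorem wins_eq_tailWins (T : PySem.Dict String Int) (win rest : List String) :
    wins T win rest = (if matchesW T win then 1 else 0) + tailWins T win rest := by
  induction rest generalizing win with
  | nil => simp [wins, tailWins]
  | cons t rest ih => simp [wins, tailWins, ih]

theorem countP_update {α : Type} (l : List α) (hl : l.Nodup) (x : α) (hx : x ∈ l)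
    (p q : α → Bool) (h : ∀ y ∈ l, y ≠ x → p y = q y) :
    (l.countP q : Int) = (l.countP p : Int) + (if q x then 1 else 0) - (if p x then 1 else 0) := by
  induction l with
  | nil => simp at hx
  | cons a l ih =>
    rcases List.nodup_cons.mp hl with ⟨ha, hl'⟩
    rcases List.mem_cons.mp hx with rfl | hx'
    · have hpq : l.countP p = l.countP q := by
        apply List.countP_congr
        intro y hy
        rw [h y (List.mem_cons_of_mem _ hy) (fun e => ha (e ▸ hy))]
      rw [List.countP_cons, List.countP_cons, hpq]
      push_cast
      split_ifs <;> omega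
    · have hax : a ≠ x := fun e => ha (e ▸ hx')
      have := ih hl' hx' (fun y hy hyx => h y (List.mem_cons_of_mem _ hy) hyx)
      rw [List.countP_cons, List.countP_cons, h a (List.mem_cons_self) hax] at *
      push_cast at *
      split_ifs at * <;> omega

theorem count_append_singleton {α : Type} [DecidableEq α] (l : List α) (x k : α) :
    ((l ++ [x]).count k : Int) = (l.count k : Int) + (if k = x then 1 else 0) := by
  rcases eq_or_ne k x with rfl | h
  · simp [List.count_append]
  · simp [List.count_append, h, Ne.symm h]

theorem getD_mem_keys (d : PySem.Dict String Int) (k : String) (hk : k ∈ d.keys) :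
    ∃ v, d.get? k = some v ∧ d.getD k 0 = v := by
  have hc : d.contains k = true := (PySem.Dict.contains_iff_mem_keys d k).mpr hk
  have hs : (d.get? k).isSome := by rw [← PySem.Dict.contains_eq_isSome_get?]; exact hc
  rcases Option.isSome_iff_exists.mp hs with ⟨v, hv⟩
  exact ⟨v, hv, by rw [PySem.Dict.getD_eq_get?_getD, hv]; rfl⟩

theorem get?_eq_none_of_not_mem (d : PySem.Dict String Int) (k : String) (hk : k ∉ d.keys) :
    d.get? k = none := (PySem.Dict.get?_eq_none_iff_not_mem_keys d k).mpr hk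

theorem stepA_core (dic : PySem.Dict String Int) (x : String) (v : Int)
    (hget : dic.get? x = some v) :
    stepInA dic x = dic.insert x (v - 1) ∧ stepOutA dic x = dic.insert x (v + 1) := by
  unfold stepInA stepOutA
  rw [hget]
  constructor <;> (dsimp only; split_ifs with h0 <;> first | rfl | (rw [not_not] at h0; rw [h0]; norm_num))

theorem stepInA_inv (T dic : PySem.Dict String Int) (win : List String) (x : String)
    (_hnd : T.keys.Nodup) (h : InvA T dic win) : InvA T (stepInA dic x) (win ++ [x]) := by
  obtain ⟨hkeys, hval⟩ := h
  by_cases hx : x ∈ T.keys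
  · obtain ⟨v, hget, hgd⟩ := getD_mem_keys dic x (hkeys ▸ hx)
    have hcont : dic.contains x = true := (PySem.Dict.contains_iff_mem_keys dic x).mpr (hkeys ▸ hx)
    rw [(stepA_core dic x v hget).1]
    refine ⟨by rw [PySem.Dict.keys_insert_of_contains dic _ hcont, hkeys], ?_⟩
    intro k hk
    rw [PySem.Dict.getD_insert, count_append_singleton]
    have h1 := hval k hk
    have h2 := hval x hx
    split_ifs with e
    · subst e; omega
    · omega
  · have : dic.get? x = none := get?_eq_none_of_not_mem dic x (hkeys ▸ hx)
    have hstep : stepInA dic x = dic := by unfold stepInA; rw [this]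
    rw [hstep]
    refine ⟨hkeys, ?_⟩
    intro k hk
    rw [count_append_singleton]
    have hkx : ¬(k = x) := fun e => hx (e ▸ hk)
    rw [if_neg hkx]
    have := hval k hk
    omega

theorem stepOutA_inv (T dic : PySem.Dict String Int) (win : List String) (x : String)
    (_hnd : T.keys.Nodup) (h : InvA T dic (x :: win)) : InvA T (stepOutA dic x) win := by
  obtain ⟨hkeys, hval⟩ := h
  have hcount : ∀ k : String, ((x :: win).count k : Int) = (win.count k : Int) + (if k = x then 1 else 0) := by
    intro k
    rcases eq_or_ne k x with rfl | hkx
    · simp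
    · simp [hkx, Ne.symm hkx]
  by_cases hx : x ∈ T.keys
  · obtain ⟨v, hget, hgd⟩ := getD_mem_keys dic x (hkeys ▸ hx)
    have hcont : dic.contains x = true := (PySem.Dict.contains_iff_mem_keys dic x).mpr (hkeys ▸ hx)
    rw [(stepA_core dic x v hget).2]
    refine ⟨by rw [PySem.Dict.keys_insert_of_contains dic _ hcont, hkeys], ?_⟩
    intro k hk
    rw [PySem.Dict.getD_insert]
    have h1 := hval k hk
    have h2 := hval x hx
    rw [hcount k] at h1
    rw [hcount x, if_pos rfl] at h2
    split_ifs with e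
    · subst e; omega
    · rw [if_neg e] at h1; omega
  · have : dic.get? x = none := get?_eq_none_of_not_mem dic x (hkeys ▸ hx)
    have hstep : stepOutA dic x = dic := by unfold stepOutA; rw [this]
    rw [hstep]
    refine ⟨hkeys, ?_⟩
    intro k hk
    have h1 := hval k hk
    rw [hcount k] at h1
    have hkx : ¬(k = x) := fun e => hx (e ▸ hk)
    rw [if_neg hkx] at h1
    omega

theorem valuesAllZero (T dic : PySem.Dict String Int) (win : List String)
    (hnd : T.keys.Nodup) (h : InvA T dic win) :
    (dic.values.all (fun v => v == 0)) = matchesW T win := by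
  obtain ⟨hkeys, hval⟩ := h
  have hnd' : dic.keys.Nodup := hkeys ▸ hnd
  unfold matchesW
  rw [← hkeys]
  rw [Bool.eq_iff_iff]
  simp only [PySem.Dict.values, PySem.Dict.keys, List.all_map, List.all_eq_true, Function.comp]
  constructor
  · intro hz p hp
    have hk : p.1 ∈ dic.keys := PySem.Dict.mem_keys_of_mem_items dic hp
    have hgd : dic.getD p.1 0 = p.2 := PySem.Dict.getD_of_mem_items dic hp hnd' 0
    have := hval p.1 (hkeys ▸ hk)
    have hz' := hz p hp
    simp only [beq_iff_eq] at *
    omega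
  · intro hm p hp
    have hk : p.1 ∈ dic.keys := PySem.Dict.mem_keys_of_mem_items dic hp
    have hgd : dic.getD p.1 0 = p.2 := PySem.Dict.getD_of_mem_items dic hp hnd' 0
    have := hval p.1 (hkeys ▸ hk)
    have hm' := hm p hp
    simp only [beq_iff_eq] at *
    omega

theorem foldInA_inv (T : PySem.Dict String Int) (l : List String) :
    ∀ (dic : PySem.Dict String Int) (win : List String), T.keys.Nodup → InvA T dic win →
    InvA T (l.foldl stepInA dic) (win ++ l) := by
  induction l with
  | nil => intro dic win _ h; simpa using h
  | cons a l ih =>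
    intro dic win hnd h
    have := ih (stepInA dic a) (win ++ [a]) hnd (stepInA_inv T dic win a hnd h)
    simpa using this

theorem loopA_eq (T : PySem.Dict String Int) (hnd : T.keys.Nodup) (dqout : List String) :
    ∀ (dic : PySem.Dict String Int) (win : List String) (ans : Int), InvA T dic win →
    (dqout ≠ [] → win ≠ []) → loopA dic win dqout ans = ans + wins T win dqout := by
  induction dqout with
  | nil =>
    intro dic win ans h _
    cases win <;>
      simp only [loopA, wins, valuesAllZero T dic _ hnd h] <;> split_ifs <;> ring
  | cons t rest ih =>
    intro dic win ans h hne
    obtain ⟨hd, tl, rfl⟩ := List.exists_cons_of_ne_nil (hne (by simp))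
    have hinv : InvA T (stepInA (stepOutA dic hd) t) (tl ++ [t]) :=
      stepInA_inv T _ tl t hnd (stepOutA_inv T dic tl hd hnd h)
    simp only [loopA, wins, valuesAllZero T dic _ hnd h, List.tail_cons]
    rw [ih _ (tl ++ [t]) _ hinv (by simp)]
    split_ifs <;> ring

theorem ite_beq_int (a b x y : Int) : (if a == b then x else y) = if a = b then x else y := by
  by_cases h : a = b <;> simp [h]

theorem ite_nbeq_int (a b x y : Int) : (if !(a == b) then x else y) = if a = b then y else x := by
  by_cases h : a = b <;> simp [h]

theorem bumpB_bookkeep (T : PySem.Dict String Int) (st : PySem.Dict String Int × Int)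
    (win win' : List String) (x : String) (δ : Int)
    (hnd : T.keys.Nodup) (h : InvB T st.1 st.2 win)
    (hc : ∀ k : String, (win'.count k : Int) = (win.count k : Int) + (if k = x then δ else 0)) :
    InvB T (bumpB T st x δ).1 (bumpB T st x δ).2 win' := by
  obtain ⟨hkeys, hcnt, hbad⟩ := h
  by_cases hx : x ∈ T.keys
  · have hcont : st.1.contains x = true := (PySem.Dict.contains_iff_mem_keys st.1 x).mpr (hkeys ▸ hx)
    have hupd := countP_update T.keys hnd x hx
      (fun k => !(T.getD k 0 == (win.count k : Int)))
      (fun k => !(T.getD k 0 == (win'.count k : Int)))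
      (by intro y _ hyx
          have h0 := hc y
          rw [if_neg hyx] at h0
          have h0' : (win'.count y : Int) = (win.count y : Int) := by omega
          dsimp only
          rw [h0'])
    unfold bumpB
    rw [if_pos hcont]
    refine ⟨?_, ?_, ?_⟩
    · dsimp only
      rw [PySem.Dict.keys_insert_of_contains st.1 _ hcont, hkeys]
    · intro k hk
      dsimp only
      rw [PySem.Dict.getD_insert]
      have h1 := hcnt x hx
      have h2 := hc k
      split_ifs with e
      · subst e; rw [if_pos rfl] at h2; omega
      · rw [if_neg e] at h2; rw [hcnt k hk]; omega
    · dsimp only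
      rw [PySem.Dict.getD_insert_self]
      beta_reduce at hupd
      have hcx' := hc x
      rw [if_pos rfl] at hcx'
      rw [hbad, hcnt x hx]
      rw [show ((win'.count x : Int)) = (win.count x : Int) + δ from hcx'] at hupd
      simp only [ite_nbeq_int] at hupd
      simp only [ite_beq_int]
      split_ifs at hupd ⊢ <;> omega
  · have hcont : st.1.contains x = false := by
      rw [← Bool.not_eq_true, PySem.Dict.contains_iff_mem_keys, hkeys]; exact hx
    unfold bumpB
    rw [if_neg (by rw [hcont]; exact Bool.false_ne_true)]
    have hsame : ∀ k, k ∈ T.keys → (win'.count k : Int) = (win.count k : Int) := by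
      intro k hk
      have := hc k
      rw [if_neg (show ¬(k = x) from fun e => hx (e ▸ hk))] at this
      omega
    refine ⟨hkeys, ?_, ?_⟩
    · intro k hk; rw [hcnt k hk, hsame k hk]
    · rw [hbad]
      congr 1
      apply List.countP_congr
      intro k hk
      rw [hsame k hk]

theorem bumpB_inv_add (T : PySem.Dict String Int) (st : PySem.Dict String Int × Int)
    (win : List String) (x : String)
    (hnd : T.keys.Nodup) (h : InvB T st.1 st.2 win) :
    InvB T (bumpB T st x 1).1 (bumpB T st x 1).2 (win ++ [x]) := by
  apply bumpB_bookkeep T st win _ x 1 hnd h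
  intro k
  rw [count_append_singleton]

theorem bumpB_inv_sub (T : PySem.Dict String Int) (st : PySem.Dict String Int × Int)
    (win : List String) (x : String)
    (hnd : T.keys.Nodup) (h : InvB T st.1 st.2 (x :: win)) :
    InvB T (bumpB T st x (-1)).1 (bumpB T st x (-1)).2 win := by
  apply bumpB_bookkeep T st (x :: win) win x (-1) hnd h
  intro k
  rcases eq_or_ne k x with rfl | hkx
  · simp [List.count_cons]
  · simp [List.count_cons, hkx, Ne.symm hkx]

theorem badZero (T cnt : PySem.Dict String Int) (bad : Int) (win : List String)
    (h : InvB T cnt bad win) : (bad == 0) = matchesW T win := by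
  obtain ⟨-, -, hbad⟩ := h
  subst hbad
  unfold matchesW
  rw [Bool.eq_iff_iff]
  simp [List.countP_eq_zero, List.all_eq_true]

theorem foldInB_inv (T : PySem.Dict String Int) (l : List String) :
    ∀ (st : PySem.Dict String Int × Int) (win : List String), T.keys.Nodup → InvB T st.1 st.2 win →
    InvB T (l.foldl (fun st d => bumpB T st d 1) st).1
      (l.foldl (fun st d => bumpB T st d 1) st).2 (win ++ l) := by
  induction l with
  | nil => intro st win _ h; simpa using h
  | cons a l ih =>
    intro st win hnd h
    have := ih (bumpB T st a 1) (win ++ [a]) hnd (bumpB_inv_add T st win a hnd h)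
    simpa using this

theorem slideB_eq (T : PySem.Dict String Int) (hnd : T.keys.Nodup) (rest : List String) :
    ∀ (win : List String) (st : PySem.Dict String Int × Int) (ans : Int), InvB T st.1 st.2 win →
    (rest ≠ [] → win ≠ []) →
    (((win ++ rest).zip rest).foldl (stepSlideB T) (st, ans)).2 = ans + tailWins T win rest := by
  induction rest with
  | nil => intro win st ans _ _; simp [tailWins]
  | cons t rest ih =>
    intro win st ans h hne
    obtain ⟨hd, tl, rfl⟩ := List.exists_cons_of_ne_nil (hne (by simp))
    have hzip : ((hd :: tl) ++ t :: rest).zip (t :: rest)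
        = (hd, t) :: (((tl ++ [t]) ++ rest).zip rest) := by
      simp [List.zip]
    rw [hzip, List.foldl_cons]
    have hst1 := bumpB_inv_sub T st tl hd hnd h
    have hst2 := bumpB_inv_add T (bumpB T st hd (-1)) tl t hnd hst1
    have hm := badZero T _ _ _ hst2
    show ((((tl ++ [t]) ++ rest).zip rest).foldl (stepSlideB T)
      ((bumpB T (bumpB T st hd (-1)) t 1),
        if (bumpB T (bumpB T st hd (-1)) t 1).2 == 0 then ans + 1 else ans)).2
      = ans + tailWins T (hd :: tl) (t :: rest)
    rw [ih (tl ++ [t]) _ _ hst2 (by simp)]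
    simp only [tailWins, List.tail_cons]
    rw [hm]
    split_ifs <;> ring

theorem initB_keys (l : List String) :
    ∀ d : PySem.Dict String Int, (∀ x ∈ l, d.contains x = false) → l.Nodup →
    (l.foldl (fun d w => d.insert w 0) d).keys = d.keys ++ l ∧
    (∀ k : String, (l.foldl (fun d w => d.insert w 0) d).getD k 0 = if k ∈ l then 0 else d.getD k 0) := by
  induction l with
  | nil => intro d _ _; simp
  | cons w l ih =>
    intro d hc hnd
    rcases List.nodup_cons.mp hnd with ⟨hw, hnd'⟩
    have hcw : d.contains w = false := hc w List.mem_cons_self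
    have hc' : ∀ x ∈ l, (d.insert w 0).contains x = false := by
      intro x hx
      rw [PySem.Dict.contains_insert]
      have : (x == w) = false := beq_eq_false_iff_ne.mpr (fun e => hw (e ▸ hx))
      rw [this, hc x (List.mem_cons_of_mem _ hx)]
      rfl
    obtain ⟨hk, hg⟩ := ih (d.insert w 0) hc' hnd'
    rw [List.foldl_cons]
    refine ⟨?_, ?_⟩
    · rw [hk, PySem.Dict.keys_insert_of_not_contains d _ hcw]
      simp
    · intro k
      rw [hg k, PySem.Dict.getD_insert]
      by_cases h1 : k ∈ l
      · simp [h1, List.mem_cons]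
      · by_cases h2 : k = w <;> simp [h1, h2, List.mem_cons]

theorem initB_inv (T : PySem.Dict String Int) (hnd : T.keys.Nodup) :
    InvB T (T.keys.foldl (fun d w => d.insert w 0) PySem.Dict.empty)
      (T.keys.foldl (fun acc w => if T.getD w 0 != 0 then acc + 1 else acc) 0) [] := by
  obtain ⟨hk, hg⟩ := initB_keys T.keys PySem.Dict.empty (by intro x _; rfl) hnd
  refine ⟨by simpa using hk, ?_, ?_⟩
  · intro k hkk
    rw [hg k, if_pos hkk]
    simp
  · rw [PySem.List.foldl_count_if (fun w => T.getD w 0 != 0) T.keys 0]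
    rw [zero_add]
    have hfun : (fun w => T.getD w 0 != 0)
        = (fun k => !(T.getD k 0 == (List.count k ([] : List String) : Int))) := by
      funext k
      simp [bne]
    rw [hfun]

theorem solution_spec : Claim_equal_solution := by
  unfold Claim_equal_solution
  intro want number discount _
  unfold Spec_solution solution solution_alt
  rw [PySem.List.slice_to discount (by norm_num), PySem.List.slice_from discount (by norm_num)]
  have h10 : ((10:Int)).toNat = 10 := rfl
  rw [h10]
  set T := PySem.Dict.ofList (want.zip number) with hT
  have hnd := PySem.Dict.nodup_keys_ofList (want.zip number)
  set win := discount.take 10 with hwin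
  set rest := discount.drop 10 with hrest
  have hsplit : discount = win ++ rest := (List.take_append_drop 10 discount).symm
  have hne : rest ≠ [] → win ≠ [] := by
    intro hr hw
    rw [hwin, List.take_eq_nil_iff] at hw
    rcases hw with h | h
    · exact absurd h (by norm_num)
    · exact hr (by rw [hrest, h]; rfl)
  have hInvA0 : InvA T T [] := ⟨rfl, fun k _ => by simp⟩
  have hInvA := foldInA_inv T win T [] hnd hInvA0
  simp only [List.nil_append] at hInvA
  rw [loopA_eq T hnd rest _ win 0 hInvA hne, zero_add]
  have hInvB0 := initB_inv T hnd
  have hInvB := foldInB_inv T win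
      (T.keys.foldl (fun d w => d.insert w 0) PySem.Dict.empty,
       T.keys.foldl (fun acc w => if T.getD w 0 != 0 then acc + 1 else acc) 0)
      [] hnd hInvB0
  simp only [List.nil_append] at hInvB
  have hm := badZero T _ _ _ hInvB
  rw [show discount.zip rest = (win ++ rest).zip rest from by rw [← hsplit]]
  rw [slideB_eq T hnd rest win _ _ hInvB hne]
  rw [hm, wins_eq_tailWins]
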